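-- pv_equiv track=rewrite | github.com/recursivecurry/coding_dojo | codeforces/round-313/div-1-b.py | sort
-- ===== SOURCE A (Python) =====
-- def sort(s, length):
--     half, one = divmod(length, 2)
--     if one == 1:
--         return s
--     else:
--         s1, s2 = sort(s[:half], half), sort(s[half:], half)
--         if s1 < s2:
--             return s1 + s2
--         else:
--             return s2 + s1
-- ===== SOURCE B (Python) =====
-- def sort(s, length):
--     # Iterative divide-and-conquer: explicit work stack with post-order combine
--     # instead of recursion.
--     tasks = [("work", s, length)]
--     results = []
--     while tasks:
--         t = tasks.pop()
--         if t[0] == "work":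
--             _, sub, n = t
--             half, one = divmod(n, 2)
--             if one == 1:
--                 results.append(sub)
--             else:
--                 tasks.append(("comb",))
--                 tasks.append(("work", sub[half:], half))
--                 tasks.append(("work", sub[:half], half))
--         else:
--             s2 = results.pop()
--             s1 = results.pop()
--             results.append(s1 + s2 if s1 < s2 else s2 + s1)
--     return results[-1]
-- ===== Notes on version B (the rewrite author's own statement) =====
-- stated objective: alternative
-- what changed: Replaces A's direct recursion by an iterative divide-and-conquer: an explicit LIFO work stack of split tasks plus a post-order combine phase merging canonicalized halves min-first.
-- outside the precondition, e.g. on sort('ab', 0): A raises RecursionError, B does not finish within the time limit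
import Mathlib
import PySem

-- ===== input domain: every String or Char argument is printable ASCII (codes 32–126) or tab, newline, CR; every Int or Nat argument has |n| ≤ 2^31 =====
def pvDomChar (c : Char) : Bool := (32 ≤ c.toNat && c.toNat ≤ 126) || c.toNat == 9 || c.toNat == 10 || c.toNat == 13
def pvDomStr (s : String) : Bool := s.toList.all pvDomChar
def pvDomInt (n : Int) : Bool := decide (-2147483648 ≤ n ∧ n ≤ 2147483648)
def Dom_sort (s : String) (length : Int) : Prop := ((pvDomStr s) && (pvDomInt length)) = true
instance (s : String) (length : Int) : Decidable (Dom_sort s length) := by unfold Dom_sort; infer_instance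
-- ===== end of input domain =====

-- B replaces A's direct recursion by an explicit work stack with a post-order
-- combine phase (alternative decomposition, same cost).

-- ===== PORT A =====
-- A's recursion, with a fuel guard for totality only (length = 0 recurses forever
-- in Python; that input is excluded by Pre_sort).
def sortFuel : Nat → String → Int → String
  | 0, s, _ => s
  | Nat.succ f, s, length =>
    if PySem.Int.mod length 2 = 1 then s
    else
      if sortFuel f (PySem.Str.slice s none (some (PySem.Int.floordiv length 2))) (PySem.Int.floordiv length 2) <
         sortFuel f (PySem.Str.slice s (some (PySem.Int.floordiv length 2)) none) (PySem.Int.floordiv length 2) then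
        sortFuel f (PySem.Str.slice s none (some (PySem.Int.floordiv length 2))) (PySem.Int.floordiv length 2) ++
        sortFuel f (PySem.Str.slice s (some (PySem.Int.floordiv length 2)) none) (PySem.Int.floordiv length 2)
      else
        sortFuel f (PySem.Str.slice s (some (PySem.Int.floordiv length 2)) none) (PySem.Int.floordiv length 2) ++
        sortFuel f (PySem.Str.slice s none (some (PySem.Int.floordiv length 2))) (PySem.Int.floordiv length 2)

def sort (s : String) (length : Int) : String := sortFuel (length.natAbs + 1) s length

-- ===== PORT B =====
inductive PvTask where
  | work : String → Int → PvTask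
  | comb : PvTask

-- Source B's loop: a LIFO task stack (list head = top) and a result stack; the fuel
-- is a totality guard only (the loop runs forever when a work item has length 0).
def runB : Nat → List PvTask → List String → String
  | _, [], results => results.headD ""
  | 0, _ :: _, _ => ""
  | Nat.succ f, PvTask.work sub n :: ts, results =>
    if PySem.Int.mod n 2 = 1 then runB f ts (sub :: results)
    else runB f (PvTask.work (PySem.Str.slice sub none (some (PySem.Int.floordiv n 2))) (PySem.Int.floordiv n 2) ::
                 PvTask.work (PySem.Str.slice sub (some (PySem.Int.floordiv n 2)) none) (PySem.Int.floordiv n 2) ::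
                 PvTask.comb :: ts) results
  | Nat.succ f, PvTask.comb :: ts, results =>
    match results with
    | s2 :: s1 :: rest => runB f ts ((if s1 < s2 then s1 ++ s2 else s2 ++ s1) :: rest)
    | _ => ""

def sort_alt (s : String) (length : Int) : String :=
  runB (8 * length.natAbs + 1) [PvTask.work s length] []

-- ===== PRECONDITION & SPEC =====
-- Pre_ excludes length = 0, on which Python A recurses forever (RecursionError); B diverges there too.
def Pre_sort (s : String) (length : Int) : Prop := length ≠ 0
instance (s : String) (length : Int) : Decidable (Pre_sort s length) := by unfold Pre_sort; infer_instance
def pvWitness_sort : String × Int := ("ab", 2)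

def Spec_sort (s : String) (length : Int) (out : String) : Prop := out = sort_alt s length
instance (s : String) (length : Int) (out : String) : Decidable (Spec_sort s length out) := by unfold Spec_sort; infer_instance

-- ===== CLAIM (what is proved, stated in full; the proofs are below) =====
def Claim_equal_sort : Prop := ∀ (s : String) (length : Int), Dom_sort s length → Pre_sort s length → Spec_sort s length (sort s length)

-- ===== LEMMAS AND PROOFS =====

-- an even Python int is exactly twice its floor half
theorem pv_even_char (l : Int) (h : PySem.Int.mod l 2 ≠ 1) : l = 2 * PySem.Int.floordiv l 2 := by
  have h1 := PySem.Int.floordiv_mul_add_mod l 2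
  have h2 : PySem.Int.mod l 2 = l % 2 := PySem.Int.mod_eq_emod_of_pos (by omega)
  omega

-- reference function: the common value of both ports (well-founded recursion)
def specSort (s : String) (l : Int) : String :=
  if PySem.Int.mod l 2 = 1 then s
  else if l = 0 then s
  else
    if specSort (PySem.Str.slice s none (some (PySem.Int.floordiv l 2))) (PySem.Int.floordiv l 2) <
       specSort (PySem.Str.slice s (some (PySem.Int.floordiv l 2)) none) (PySem.Int.floordiv l 2) then
      specSort (PySem.Str.slice s none (some (PySem.Int.floordiv l 2))) (PySem.Int.floordiv l 2) ++
      specSort (PySem.Str.slice s (some (PySem.Int.floordiv l 2)) none) (PySem.Int.floordiv l 2)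
    else
      specSort (PySem.Str.slice s (some (PySem.Int.floordiv l 2)) none) (PySem.Int.floordiv l 2) ++
      specSort (PySem.Str.slice s none (some (PySem.Int.floordiv l 2))) (PySem.Int.floordiv l 2)
termination_by l.natAbs
decreasing_by
  all_goals
    have := pv_even_char l (by assumption)
    omega

-- number of loop iterations B's machine spends on one work item
def specCost (l : Int) : Nat :=
  if PySem.Int.mod l 2 = 1 then 1
  else if l = 0 then 1
  else specCost (PySem.Int.floordiv l 2) * 2 + 2
termination_by l.natAbs
decreasing_by
  have := pv_even_char l (by assumption)
  omega

theorem sortFuel_eq_spec : ∀ (f : Nat) (l : Int) (s : String),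
    l ≠ 0 → l.natAbs ≤ f → sortFuel f s l = specSort s l := by
  intro f
  induction f with
  | zero => intro l s h0 hle; omega
  | succ f ih =>
    intro l s h0 hle
    by_cases hodd : PySem.Int.mod l 2 = 1
    · rw [sortFuel, specSort, if_pos hodd, if_pos hodd]
    · have h2 := pv_even_char l hodd
      have hh0 : PySem.Int.floordiv l 2 ≠ 0 := by omega
      have hhle : (PySem.Int.floordiv l 2).natAbs ≤ f := by omega
      rw [sortFuel, specSort]
      simp only [if_neg hodd, if_neg h0]
      rw [ih _ _ hh0 hhle, ih _ _ hh0 hhle]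

theorem runB_nil (f : Nat) (out : List String) : runB f [] out = out.headD "" := by
  cases f <;> rfl

theorem runB_work : ∀ (n : Nat) (l : Int), l.natAbs ≤ n → l ≠ 0 →
    ∀ (s : String) (ts : List PvTask) (out : List String) (f : Nat),
      runB (specCost l + f) (PvTask.work s l :: ts) out = runB f ts (specSort s l :: out) := by
  intro n
  induction n with
  | zero => intro l h0 hne; omega
  | succ n ih =>
    intro l hle hne s ts out f
    by_cases hodd : PySem.Int.mod l 2 = 1
    · have hc : specCost l = 1 := by rw [specCost, if_pos hodd]
      have hs : specSort s l = s := by rw [specSort, if_pos hodd]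
      rw [hc, hs, Nat.add_comm]
      show runB (Nat.succ f) (PvTask.work s l :: ts) out = _
      rw [runB, if_pos hodd]
    · have h2 := pv_even_char l hodd
      have hh0 : PySem.Int.floordiv l 2 ≠ 0 := by omega
      have hhle : (PySem.Int.floordiv l 2).natAbs ≤ n := by omega
      have hc : specCost l = specCost (PySem.Int.floordiv l 2) * 2 + 2 := by
        rw [specCost, if_neg hodd, if_neg hne]
      rw [hc]
      have hfuel : specCost (PySem.Int.floordiv l 2) * 2 + 2 + f =
          Nat.succ (specCost (PySem.Int.floordiv l 2) +
            (specCost (PySem.Int.floordiv l 2) + (1 + f))) := by omega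
      rw [hfuel, runB, if_neg hodd, ih _ hhle hh0, ih _ hhle hh0]
      have h1f : 1 + f = Nat.succ f := by omega
      rw [h1f, runB]
      conv_rhs => rw [specSort, if_neg hodd, if_neg hne]

theorem specCost_le : ∀ (n : Nat) (l : Int), l.natAbs ≤ n → l ≠ 0 →
    specCost l ≤ 8 * l.natAbs - 6 := by
  intro n
  induction n with
  | zero => intro l h0 hne; omega
  | succ n ih =>
    intro l hle hne
    by_cases hodd : PySem.Int.mod l 2 = 1
    · rw [specCost, if_pos hodd]; omega
    · have h2 := pv_even_char l hodd
      have hh0 : PySem.Int.floordiv l 2 ≠ 0 := by omega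
      have hhle : (PySem.Int.floordiv l 2).natAbs ≤ n := by omega
      have := ih _ hhle hh0
      rw [specCost, if_neg hodd, if_neg hne]
      omega

-- ===== VERDICT (by name: the statement is the Claim_ definition above) =====
theorem sort_spec : Claim_equal_sort := by
  intro s l _ hpre
  unfold Spec_sort sort sort_alt
  rw [sortFuel_eq_spec _ _ _ hpre (by omega)]
  have hc := specCost_le l.natAbs l le_rfl hpre
  have hsplit : 8 * l.natAbs + 1 = specCost l + (8 * l.natAbs + 1 - specCost l) := by omega
  rw [hsplit, runB_work l.natAbs l le_rfl hpre, runB_nil]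
  rfl
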